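-- pv_equiv track=rewrite | github.com/simdutf/simdutf | scripts/sse_utf8_utf16_decode.py | buildshuf123_threebytes
-- ===== SOURCE A (Python) =====
-- def buildshuf123_threebytes(sizes):
--     answer = [0 for i in range(16)]
--     pos = 0
--     for i in range(len(sizes)): # 4 * 4 = 16
--         if(sizes[i] == 1):
--             answer[4*i] = pos
--             answer[4*i+1] = 0xff
--             answer[4*i+2] = 0xff
--             answer[4*i+3] = 0xff
--             pos += 1
--         elif(sizes[i] == 2):
--             answer[4*i] = pos + 1
--             answer[4*i+1] = pos
--             answer[4*i+2] = 0xff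
--             answer[4*i+3] = 0xff
--             pos += 2
--         else: # must be three
--             answer[4*i] = pos + 2
--             answer[4*i+1] = pos + 1
--             answer[4*i+2] = pos
--             answer[4*i+3] = 0xff
--             pos += 3
--     answer[15] = 0xF0 | sum(sizes)
--     return answer
-- ===== SOURCE B (Python) =====
-- def buildshuf123_threebytes(sizes):
--     # staged: effective widths, then prefix offsets, then one flat loop over output byte positions
--     eff = [sz if sz in (1, 2) else 3 for sz in sizes]
--     starts = [0]
--     for s in eff:
--         starts.append(starts[-1] + s)
--     answer = [0] * 16
--     for j in range(4 * len(sizes)):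
--         i, k = divmod(j, 4)
--         answer[j] = starts[i] + eff[i] - 1 - k if k < eff[i] else 0xff
--     answer[15] = 0xF0 | sum(sizes)
--     return answer
-- ===== Notes on version B (the rewrite author's own statement) =====
-- stated objective: alternative
-- what changed: B is output-index driven in stages: it first computes effective widths and their prefix-sum offsets, then fills the mask in one flat loop over byte positions j using divmod(j,4) and a single formula, instead of A's per-size branch that unrolls three constant-assignment blocks while threading a running pos.
import Mathlib
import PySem

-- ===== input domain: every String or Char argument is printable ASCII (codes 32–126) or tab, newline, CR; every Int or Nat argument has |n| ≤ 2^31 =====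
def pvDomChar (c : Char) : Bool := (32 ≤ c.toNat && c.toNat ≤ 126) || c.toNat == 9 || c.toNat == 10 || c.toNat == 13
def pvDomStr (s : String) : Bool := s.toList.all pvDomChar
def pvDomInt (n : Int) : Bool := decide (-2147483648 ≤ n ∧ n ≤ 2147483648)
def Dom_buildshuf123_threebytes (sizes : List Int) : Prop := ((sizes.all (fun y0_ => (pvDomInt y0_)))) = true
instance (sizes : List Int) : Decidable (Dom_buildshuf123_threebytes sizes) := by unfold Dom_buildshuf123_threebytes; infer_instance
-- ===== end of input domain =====

-- B replaces A's running-pos branch-unrolled block writes by a staged, output-index-driven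
-- construction (effective widths, prefix offsets, one flat loop over byte positions) — same values.


-- ===== PORT A =====
-- answer[j] = v with 0 ≤ j < len(answer) (guaranteed inside Pre_) is List.set
def pvSetI (xs : List Int) (i : Int) (v : Int) : List Int := xs.set i.toNat v

-- the body of A's for-loop, branches in source order (answer = st.1, pos = st.2)
def pvAStep (sz : Int) (i : Int) (st : List Int × Int) : List Int × Int :=
  let answer := st.1
  let pos := st.2
  if sz = 1 then
    (pvSetI (pvSetI (pvSetI (pvSetI answer (4*i) pos) (4*i+1) 0xff) (4*i+2) 0xff) (4*i+3) 0xff,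
     pos + 1)
  else if sz = 2 then
    (pvSetI (pvSetI (pvSetI (pvSetI answer (4*i) (pos+1)) (4*i+1) pos) (4*i+2) 0xff) (4*i+3) 0xff,
     pos + 2)
  else
    (pvSetI (pvSetI (pvSetI (pvSetI answer (4*i) (pos+2)) (4*i+1) (pos+1)) (4*i+2) pos) (4*i+3) 0xff,
     pos + 3)

def buildshuf123_threebytes (sizes : List Int) : List Int :=
  let st := (PySem.List.pyRange 0 (sizes.length : Int) 1).foldl
    (fun st i => pvAStep (PySem.List.pyGetD sizes i 0) i st)   -- sizes[i], i ∈ range(len(sizes))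
    (List.replicate 16 0, 0)
  pvSetI st.1 15 (PySem.Int.bor 0xF0 sizes.sum)

-- ===== PORT B =====
def buildshuf123_threebytes_alt (sizes : List Int) : List Int :=
  let eff := sizes.map (fun sz => if sz = 1 ∨ sz = 2 then sz else 3)
  let starts := eff.foldl (fun st s => st ++ [PySem.List.pyGetD st (-1) 0 + s]) [(0 : Int)]
  let answer := (PySem.List.pyRange 0 (4 * (sizes.length : Int)) 1).foldl
    (fun ans j =>
      let i := PySem.Int.floordiv j 4
      let k := PySem.Int.mod j 4
      pvSetI ans j
        (if k < PySem.List.pyGetD eff i 0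
         then PySem.List.pyGetD starts i 0 + PySem.List.pyGetD eff i 0 - 1 - k
         else 0xff))
    (List.replicate 16 0)
  pvSetI answer 15 (PySem.Int.bor 0xF0 sizes.sum)

-- ===== PRECONDITION & SPEC =====
-- Pre_ excludes exactly the inputs where A raises IndexError (more than 4 sizes: the write
-- answer[4*i] with 4*i ≥ 16 is out of range); B raises IndexError there too (answer[j], j ≥ 16).
def Pre_buildshuf123_threebytes (sizes : List Int) : Prop := sizes.length ≤ 4
instance (sizes : List Int) : Decidable (Pre_buildshuf123_threebytes sizes) := by unfold Pre_buildshuf123_threebytes; infer_instance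
def pvWitness_buildshuf123_threebytes : List Int := [1, 3, 2]

def Spec_buildshuf123_threebytes (sizes : List Int) (out : List Int) : Prop := out = buildshuf123_threebytes_alt sizes
instance (sizes : List Int) (out : List Int) : Decidable (Spec_buildshuf123_threebytes sizes out) := by unfold Spec_buildshuf123_threebytes; infer_instance

-- ===== CLAIM (what is proved, stated in full; the proofs are below) =====
def Claim_equal_buildshuf123_threebytes : Prop := ∀ (sizes : List Int), Dom_buildshuf123_threebytes sizes → Pre_buildshuf123_threebytes sizes → Spec_buildshuf123_threebytes sizes (buildshuf123_threebytes sizes)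

-- ===== LEMMAS AND PROOFS =====

-- the 4-byte block A produces for one size, and the effective width
def pvBlock (pos sz : Int) : List Int :=
  if sz = 1 then [pos, 255, 255, 255]
  else if sz = 2 then [pos + 1, pos, 255, 255]
  else [pos + 2, pos + 1, pos, 255]

def pvS (sz : Int) : Int := if sz = 1 ∨ sz = 2 then sz else 3

def pvBlocks : List Int → Int → List Int
  | [], _ => []
  | sz :: l, pos => pvBlock pos sz ++ pvBlocks l (pos + pvS sz)

theorem pvBlock_length (pos sz : Int) : (pvBlock pos sz).length = 4 := by
  unfold pvBlock; split_ifs <;> rfl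

theorem pvBlocks_length (l : List Int) : ∀ pos, (pvBlocks l pos).length = 4 * l.length := by
  induction l with
  | nil => intro pos; rfl
  | cons sz l ih => intro pos; simp [pvBlocks, pvBlock_length, ih]; omega

theorem pvSet_append_right (P l : List Int) (k : Nat) (v : Int) :
    (P ++ l).set (P.length + k) v = P ++ l.set k v := by
  induction P with
  | nil => simp
  | cons a P ih =>
    have h : (a :: P).length + k = (P.length + k) + 1 := by simp; omega
    rw [List.cons_append, h, List.set_cons_succ, ih, List.cons_append]

theorem pvAStep_eq (P tail : List Int) (pos sz : Int) (i : Nat) (hP : P.length = 4 * i) :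
    pvAStep sz (i : Int) (P ++ (0 :: 0 :: 0 :: 0 :: tail), pos)
      = ((P ++ pvBlock pos sz) ++ tail, pos + pvS sz) := by
  have e0 : (4 * (i : Int)).toNat = P.length + 0 := by omega
  have e1 : (4 * (i : Int) + 1).toNat = P.length + 1 := by omega
  have e2 : (4 * (i : Int) + 2).toNat = P.length + 2 := by omega
  have e3 : (4 * (i : Int) + 3).toNat = P.length + 3 := by omega
  by_cases h1 : sz = 1
  · subst h1
    simp only [pvAStep, pvSetI, pvBlock, pvS]
    rw [e0, pvSet_append_right, e1, pvSet_append_right, e2, pvSet_append_right,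
        e3, pvSet_append_right, List.append_assoc]
    rfl
  · by_cases h2 : sz = 2
    · subst h2
      simp only [pvAStep, pvSetI, if_neg (by decide : ¬ (2 : Int) = 1),
                 pvBlock, pvS]
      rw [e0, pvSet_append_right, e1, pvSet_append_right, e2, pvSet_append_right,
          e3, pvSet_append_right, List.append_assoc]
      rfl
    · have hs : pvS sz = 3 := by simp [pvS, h1, h2]
      have hb : pvBlock pos sz = [pos + 2, pos + 1, pos, 255] := by simp [pvBlock, h1, h2]
      simp only [pvAStep, pvSetI, if_neg h1, if_neg h2, hb, hs]
      rw [e0, pvSet_append_right, e1, pvSet_append_right, e2, pvSet_append_right,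
          e3, pvSet_append_right, List.append_assoc]
      rfl

theorem pvALoop (sizes : List Int) (l : List Int) : ∀ (i : Nat) (acc rest : List Int) (pos : Int),
    List.drop i sizes = l → acc.length = 4 * i →
    List.foldl (fun st j => pvAStep (PySem.List.pyGetD sizes j 0) j st)
      (acc ++ List.replicate (4 * l.length) 0 ++ rest, pos)
      (PySem.List.pyRange (i : Int) (sizes.length : Int) 1)
    = (acc ++ pvBlocks l pos ++ rest, pos + ((l.map pvS).sum)) := by
  induction l with
  | nil =>
    intro i acc rest pos hd hlen
    have hle : sizes.length ≤ i := List.drop_eq_nil_iff.mp hd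
    have hr : PySem.List.pyRange (i : Int) (sizes.length : Int) 1 = [] := by
      simp [PySem.List.pyRange]
      omega
    rw [hr]
    simp [pvBlocks]
  | cons sz l ih =>
    intro i acc rest pos hd hlen
    have hi : i < sizes.length := by
      have := congrArg List.length hd
      simp at this; omega
    have hcons : PySem.List.pyRange (i : Int) (sizes.length : Int) 1
        = (i : Int) :: PySem.List.pyRange ((i : Int) + 1) (sizes.length : Int) 1 := by
      exact PySem.List.pyRange_one_cons (by exact_mod_cast hi)
    have hget : PySem.List.pyGetD sizes (i : Int) 0 = sz := by
      have h0 : sizes[i]? = some sz := by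
        have : (List.drop i sizes)[0]? = some sz := by rw [hd]; rfl
        simpa using this
      have h1 : sizes[i] = sz := by
        have := List.getElem?_eq_getElem (l := sizes) (i := i) hi
        rw [this] at h0; exact Option.some.inj h0
      rw [PySem.List.pyGetD_ofNat sizes i 0 hi, h1]
    have hdrop : List.drop (i + 1) sizes = l := by
      have : List.drop 1 (List.drop i sizes) = List.drop 1 (sz :: l) := by rw [hd]
      simpa [List.drop_drop, Nat.add_comm] using this
    have hrep : List.replicate (4 * (sz :: l).length) (0 : Int)
        = 0 :: 0 :: 0 :: 0 :: List.replicate (4 * l.length) 0 := by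
      have h4 : 4 * (sz :: l).length = 4 + 4 * l.length := by simp; omega
      rw [h4, List.replicate_add]
      rfl
    rw [hcons, List.foldl_cons, hrep]
    have hstep := pvAStep_eq acc (List.replicate (4 * l.length) 0 ++ rest) pos sz i hlen
    rw [show acc ++ (0 :: 0 :: 0 :: 0 :: List.replicate (4 * l.length) (0:Int)) ++ rest
          = acc ++ (0 :: 0 :: 0 :: 0 :: (List.replicate (4 * l.length) (0:Int) ++ rest)) by
        simp [List.append_assoc]]
    rw [hget, hstep]
    have hcast : ((i : Int) + 1) = ((i + 1 : Nat) : Int) := by push_cast; ring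
    rw [show (acc ++ pvBlock pos sz) ++ (List.replicate (4 * l.length) (0:Int) ++ rest)
          = (acc ++ pvBlock pos sz) ++ List.replicate (4 * l.length) (0:Int) ++ rest by
        simp [List.append_assoc]]
    rw [hcast, ih (i + 1) (acc ++ pvBlock pos sz) rest (pos + pvS sz) hdrop
        (by simp [pvBlock_length]; omega)]
    simp [pvBlocks, List.append_assoc]
    ring

-- B-side helpers: the prefix list produced by the starts loop
def pvAcc (x : Int) : List Int → List Int
  | [] => []
  | s :: l => (x + s) :: pvAcc (x + s) l

theorem pvStartsLoop (l : List Int) : ∀ (pref : List Int) (x : Int),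
    l.foldl (fun st s => st ++ [PySem.List.pyGetD st (-1) 0 + s]) (pref ++ [x])
      = pref ++ [x] ++ pvAcc x l := by
  induction l with
  | nil => intro pref x; simp [pvAcc]
  | cons s l ih =>
    intro pref x
    rw [List.foldl_cons, PySem.List.pyGetD_neg_one_append_singleton,
        show (pref ++ [x]) ++ [x + s] = (pref ++ [x]) ++ [x + s] from rfl, ih (pref ++ [x]) (x + s)]
    simp [pvAcc]

theorem pvStarts_getD (l : List Int) : ∀ (x : Int) (i : Nat), i ≤ l.length →
    (x :: pvAcc x l).getD i 0 = x + (l.take i).sum := by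
  induction l with
  | nil =>
    intro x i hi
    have h0 : i = 0 := Nat.le_zero.mp hi
    subst h0
    simp
  | cons s l ih =>
    intro x i hi
    cases i with
    | zero => simp
    | succ i =>
      have h := ih (x + s) i (by simpa using hi)
      rw [show pvAcc x (s :: l) = (x + s) :: pvAcc (x + s) l from rfl,
          show ((x :: (x + s) :: pvAcc (x + s) l).getD (i + 1) 0)
             = ((x + s) :: pvAcc (x + s) l).getD i 0 from rfl, h]
      simp
      ring

-- index characterisation of the block list
theorem pvBlocks_getD (l : List Int) : ∀ (pos : Int) (m : Nat), m < 4 * l.length →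
    (pvBlocks l pos).getD m 0 =
      (if ((m % 4 : Nat) : Int) < pvS (l.getD (m / 4) 0)
       then (pos + ((l.map pvS).take (m / 4)).sum) + pvS (l.getD (m / 4) 0) - 1 - ((m % 4 : Nat) : Int)
       else 255) := by
  induction l with
  | nil => intro pos m hm; simp at hm
  | cons sz l ih =>
    intro pos m hm
    by_cases h4 : m < 4
    · have hd : m / 4 = 0 := by omega
      have hmm : m % 4 = m := by omega
      rw [hd, hmm]
      have hlt : m < (pvBlock pos sz).length := by rw [pvBlock_length]; exact h4
      have hL : (pvBlocks (sz :: l) pos).getD m 0 = (pvBlock pos sz).getD m 0 := by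
        rw [show pvBlocks (sz :: l) pos = pvBlock pos sz ++ pvBlocks l (pos + pvS sz) from rfl,
            List.getD_append _ _ _ _ hlt]
      rw [hL]
      simp only [List.getD_cons_zero, List.take_zero, List.sum_nil, add_zero]
      by_cases h1 : sz = 1
      · subst h1; interval_cases m <;> simp [pvBlock, pvS]
      · by_cases h2 : sz = 2
        · subst h2; interval_cases m <;> simp [pvBlock, pvS] <;> omega
        · have hs : pvS sz = 3 := by simp [pvS, h1, h2]
          interval_cases m <;> simp [pvBlock, pvS, h1, h2] <;> omega
    · have hge : 4 ≤ m := by omega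
      have hlen : (pvBlock pos sz).length = 4 := pvBlock_length pos sz
      have hR : (pvBlocks (sz :: l) pos).getD m 0
          = (pvBlocks l (pos + pvS sz)).getD (m - 4) 0 := by
        rw [show pvBlocks (sz :: l) pos = pvBlock pos sz ++ pvBlocks l (pos + pvS sz) from rfl,
            List.getD_append_right _ _ _ _ (by omega : (pvBlock pos sz).length ≤ m), hlen]
      rw [hR, ih (pos + pvS sz) (m - 4) (by simp at hm ⊢; omega)]
      have hdiv : (m - 4) / 4 = m / 4 - 1 := by omega
      have hmod : (m - 4) % 4 = m % 4 := by omega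
      have hd1 : 1 ≤ m / 4 := by omega
      have hgd : l.getD (m / 4 - 1) 0 = (sz :: l).getD (m / 4) 0 := by
        rcases Nat.exists_eq_add_of_le hd1 with ⟨t, ht⟩
        rw [ht]
        simp [Nat.add_comm]
      have htk : ((sz :: l).map pvS).take (m / 4) = pvS sz :: ((l.map pvS).take (m / 4 - 1)) := by
        rcases Nat.exists_eq_add_of_le hd1 with ⟨t, ht⟩
        rw [ht]
        simp [Nat.add_comm]
      rw [hdiv, hmod, hgd, htk]
      simp only [List.sum_cons]
      ring_nf

-- the fill loop: setting positions 0..n-1 of init to g(j)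
theorem pvFill (g : Int → Int) (n : Nat) : ∀ (init : List Int), n ≤ init.length →
    (PySem.List.pyRange 0 (n : Int) 1).foldl (fun ans j => pvSetI ans j (g j)) init
      = (List.range n).map (fun (m : Nat) => g (m : Int)) ++ init.drop n := by
  induction n with
  | zero => intro init h; simp [PySem.List.pyRange]
  | succ n ih =>
    intro init h
    have hsp : PySem.List.pyRange 0 ((n + 1 : Nat) : Int) 1
        = PySem.List.pyRange 0 (n : Int) 1 ++ [(n : Int)] := by
      have := PySem.List.pyRange_one_succ_right (a := 0) (b := (n : Int))
        (Int.natCast_nonneg n)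
      rw [← this]; norm_num
    rw [hsp, List.foldl_append, ih init (by omega)]
    simp only [List.foldl_cons, List.foldl_nil]
    have hn : n < init.length := by omega
    have hdropc : init.drop n = init[n] :: init.drop (n + 1) := List.drop_eq_getElem_cons hn
    have hset := pvSet_append_right ((List.range n).map (fun (m : Nat) => g (m : Int)))
      (init[n] :: init.drop (n + 1)) 0 (g (n : Int))
    rw [show ((List.range n).map (fun (m : Nat) => g (m : Int))).length + 0 = n by simp] at hset
    unfold pvSetI
    rw [show ((n : Int)).toNat = n by omega, hdropc, hset]
    simp [List.range_succ]
    rw [hdropc]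
    rfl

theorem pvFloordiv4 (m : Nat) : PySem.Int.floordiv (m : Int) 4 = ((m / 4 : Nat) : Int) := by
  simp [PySem.Int.floordiv, Int.fdiv_eq_ediv]

theorem pvFmod4 (m : Nat) : PySem.Int.mod (m : Int) 4 = ((m % 4 : Nat) : Int) := by
  simp [PySem.Int.mod, Int.fmod_eq_emod]

-- the per-output-byte formula of B produces exactly A's block list
theorem pvMapG (sizes : List Int) :
    (List.range (4 * sizes.length)).map (fun (m : Nat) =>
        if PySem.Int.mod (m : Int) 4 < PySem.List.pyGetD (sizes.map pvS) (PySem.Int.floordiv (m : Int) 4) 0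
        then PySem.List.pyGetD (0 :: pvAcc 0 (sizes.map pvS)) (PySem.Int.floordiv (m : Int) 4) 0
              + PySem.List.pyGetD (sizes.map pvS) (PySem.Int.floordiv (m : Int) 4) 0 - 1
              - PySem.Int.mod (m : Int) 4
        else 255)
    = pvBlocks sizes 0 := by
  apply List.ext_getElem
  · simp [pvBlocks_length]
  intro m h1 h2
  have hm : m < 4 * sizes.length := by simpa using h1
  have hm4 : m / 4 < sizes.length := by omega
  rw [List.getElem_map]
  simp only [List.getElem_range, pvFloordiv4, pvFmod4, PySem.List.pyGetD_natCast]
  rw [← List.getD_eq_getElem (pvBlocks sizes 0) 0, pvBlocks_getD sizes 0 m hm]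
  have heff : (sizes.map pvS).getD (m / 4) 0 = pvS (sizes.getD (m / 4) 0) := by
    rw [List.getD_eq_getElem _ _ (by simpa using hm4), List.getD_eq_getElem _ _ hm4,
        List.getElem_map]
  have hstarts : (0 :: pvAcc 0 (sizes.map pvS)).getD (m / 4) 0
      = 0 + ((sizes.map pvS).take (m / 4)).sum :=
    pvStarts_getD (sizes.map pvS) 0 (m / 4) (by simpa using Nat.le_of_lt hm4)
  rw [heff, hstarts]

-- ===== VERDICT (by name: the statement is the Claim_ definition above) =====
theorem buildshuf123_threebytes_spec : Claim_equal_buildshuf123_threebytes := by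
  intro sizes _ hpre
  unfold Spec_buildshuf123_threebytes
  unfold Pre_buildshuf123_threebytes at hpre
  unfold buildshuf123_threebytes buildshuf123_threebytes_alt
  -- A side: replay the loop into the canonical block list
  have hrep16 : List.replicate 16 (0 : Int)
      = List.replicate (4 * sizes.length) 0 ++ List.replicate (16 - 4 * sizes.length) 0 := by
    rw [← List.replicate_add]
    congr 1
    omega
  have hA := pvALoop sizes sizes 0 [] (List.replicate (16 - 4 * sizes.length) 0) 0 rfl rfl
  simp only [Nat.cast_zero, List.nil_append] at hA
  conv_lhs => rw [hrep16, hA]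
  -- B side: starts loop, then the fill loop, then the pointwise identification
  have hstartsL := pvStartsLoop (sizes.map pvS) [] 0
  simp only [List.nil_append, List.singleton_append] at hstartsL
  rw [show (fun sz => if sz = 1 ∨ sz = 2 then sz else 3) = pvS from rfl]
  dsimp only
  rw [hstartsL]
  rw [show (4 * (sizes.length : Int)) = ((4 * sizes.length : Nat) : Int) by push_cast; ring]
  rw [pvFill (fun j =>
        if PySem.Int.mod j 4 < PySem.List.pyGetD (sizes.map pvS) (PySem.Int.floordiv j 4) 0
        then PySem.List.pyGetD (0 :: pvAcc 0 (sizes.map pvS)) (PySem.Int.floordiv j 4) 0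
              + PySem.List.pyGetD (sizes.map pvS) (PySem.Int.floordiv j 4) 0 - 1
              - PySem.Int.mod j 4
        else 255) (4 * sizes.length) (List.replicate 16 0) (by simp; omega)]
  rw [pvMapG, List.drop_replicate]
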